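-- pv_equiv track=rewrite | github.com/aosoldatenkov/hyperbolic | py/lattice.py | integers
-- ===== SOURCE A (Python) =====
-- import itertools as it
--
-- def integers(signed=True, length=-1):
--     n = length
--     if signed:
--         for i in it.count(0, 1):
--             yield (i >> 1) - (i & 1) * (i | 1)
--             n -= 1
--             if n == 0:
--                 break
--     else:
--         for i in it.count(0, 1):
--             yield i
--             n -= 1
--             if n == 0:
--                 break
-- ===== SOURCE B (Python) =====
-- def integers(signed=True, length=-1):
--     n = length
--     if signed:
--         yield 0
--         n -= 1
--         if n == 0:
--             return
--         k = 1
--         while True: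
--             yield -k
--             n -= 1
--             if n == 0:
--                 return
--             yield k
--             n -= 1
--             if n == 0:
--                 return
--             k += 1
--     else:
--         i = 0
--         while True:
--             yield i
--             n -= 1
--             if n == 0:
--                 return
--             i += 1
-- ===== Notes on version B (the rewrite author's own statement) =====
-- stated objective: alternative
-- what changed: The signed branch yields 0 once and then loops over k=1,2,... yielding -k then +k per iteration, replacing A's per-index bit-trick formula (i>>1)-(i&1)*(i|1); the yield-then-decrement counting is kept so a break can fall between -k and k.
import Mathlib
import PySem

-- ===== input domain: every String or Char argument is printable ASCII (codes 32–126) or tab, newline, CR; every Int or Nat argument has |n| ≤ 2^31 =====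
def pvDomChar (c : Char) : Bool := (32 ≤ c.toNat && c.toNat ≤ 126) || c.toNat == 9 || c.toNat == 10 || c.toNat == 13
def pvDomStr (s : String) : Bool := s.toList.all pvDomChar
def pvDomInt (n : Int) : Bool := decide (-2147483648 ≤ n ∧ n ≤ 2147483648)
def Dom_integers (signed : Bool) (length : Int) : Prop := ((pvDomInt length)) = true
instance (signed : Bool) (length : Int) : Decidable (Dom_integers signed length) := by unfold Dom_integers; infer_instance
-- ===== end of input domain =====

-- Both versions are Python generators; the equivalence is about the finite sequence of
-- yields when length ≥ 1 (for length ≤ 0 both generators are infinite, excluded by Pre_).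
-- B replaces A's per-index bit formula with a 0-then-(-k,+k)-pairs loop: 'alternative'.

-- ===== PORT A =====
-- A: 'if signed:' chooses one of two 'for i in it.count(0,1)' loops; each yields, then
-- does 'n -= 1; if n == 0: break'.  Fuel = number of yields = length.toNat (length ≥ 1
-- by Pre_); the index i is a Nat, so Python's >>,&,| are Nat's >>>, &&&, |||, exact here.
def integersA_signed (m : Nat) (i : Nat) : List Int :=
  match m with
  | 0 => []
  | m + 1 =>
    (((i >>> 1 : Nat) : Int) - ((i &&& 1 : Nat) : Int) * ((i ||| 1 : Nat) : Int))
      :: integersA_signed m (i + 1)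

def integersA_unsigned (m : Nat) (i : Nat) : List Int :=
  match m with
  | 0 => []
  | m + 1 => (i : Int) :: integersA_unsigned m (i + 1)

def integers (signed : Bool) (length : Int) : List Int :=
  if signed then integersA_signed length.toNat 0 else integersA_unsigned length.toNat 0

-- ===== PORT B =====
-- B's signed branch: yield 0 (stop if that used up the budget), then per k yield -k,
-- maybe stop, yield k, maybe stop, k += 1.
def integersB_pairs (m : Nat) (k : Int) : List Int :=
  match m with
  | 0 => []
  | 1 => [-k]
  | m + 2 => -k :: k :: integersB_pairs m (k + 1)

def integersB_unsigned (m : Nat) (i : Int) : List Int :=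
  match m with
  | 0 => []
  | m + 1 => i :: integersB_unsigned m (i + 1)

def integers_alt (signed : Bool) (length : Int) : List Int :=
  if signed then
    match length.toNat with
    | 0 => []
    | m + 1 => 0 :: integersB_pairs m 1
  else integersB_unsigned length.toNat 0

-- ===== PRECONDITION & SPEC =====
-- Pre_ excludes length ≤ 0 (including the defaults length=-1 and 0), on which both
-- generators never terminate: the 'if n == 0' check comes after a decrement, so it is
-- never hit once n starts non-positive.
def Pre_integers (signed : Bool) (length : Int) : Prop := 1 ≤ length
instance (signed : Bool) (length : Int) : Decidable (Pre_integers signed length) := by unfold Pre_integers; infer_instance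
def pvWitness_integers : Bool × Int := (true, 5)

def Spec_integers (signed : Bool) (length : Int) (out : List Int) : Prop := out = integers_alt signed length
instance (signed : Bool) (length : Int) (out : List Int) : Decidable (Spec_integers signed length out) := by unfold Spec_integers; infer_instance

-- ===== CLAIM (what is proved, stated in full; the proofs are below) =====
def Claim_equal_integers : Prop := ∀ (signed : Bool) (length : Int), Dom_integers signed length → Pre_integers signed length → Spec_integers signed length (integers signed length)

-- ===== LEMMAS AND PROOFS =====

theorem odd_or_one (k : Nat) : (2 * k + 1) ||| 1 = 2 * k + 1 := by
  apply Nat.eq_of_testBit_eq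
  intro j
  rw [Nat.testBit_or]
  cases j with
  | zero =>
    have h : (2 * k + 1) % 2 = 1 := by omega
    rw [Nat.testBit_zero, Nat.testBit_zero, h]
    simp
  | succ j =>
    have h1 : Nat.testBit 1 (j + 1) = false := by
      rw [Nat.testBit_succ]
      simp
    rw [h1]
    simp

theorem fodd (k : Nat) :
    (((2 * k + 1) >>> 1 : Nat) : Int) - (((2 * k + 1) &&& 1 : Nat) : Int) * (((2 * k + 1) ||| 1 : Nat) : Int)
      = -((k : Int) + 1) := by
  rw [Nat.shiftRight_one, Nat.and_one_is_mod, odd_or_one]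
  have h1 : (2 * k + 1) / 2 = k := by omega
  have h2 : (2 * k + 1) % 2 = 1 := by omega
  rw [h1, h2]
  push_cast
  ring

theorem feven (k : Nat) :
    (((2 * k + 2) >>> 1 : Nat) : Int) - (((2 * k + 2) &&& 1 : Nat) : Int) * (((2 * k + 2) ||| 1 : Nat) : Int)
      = (k : Int) + 1 := by
  rw [Nat.shiftRight_one, Nat.and_one_is_mod]
  have h1 : (2 * k + 2) / 2 = k + 1 := by omega
  have h2 : (2 * k + 2) % 2 = 0 := by omega
  rw [h1, h2]
  push_cast
  ring

theorem loopU_eq (m : Nat) (i : Nat) :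
    integersA_unsigned m i = integersB_unsigned m (i : Int) := by
  induction m generalizing i with
  | zero => rfl
  | succ m ih =>
    simp only [integersA_unsigned, integersB_unsigned, ih (i + 1)]
    norm_cast

theorem loopS_eq : (m k : Nat) →
    integersA_signed m (2 * k + 1) = integersB_pairs m ((k : Int) + 1)
  | 0, _ => rfl
  | 1, k => by
    show [_] = [-((k : Int) + 1)]
    rw [fodd k]
  | (m + 2), k => by
    have e1 : 2 * k + 1 + 1 = 2 * k + 2 := by omega
    have e2 : 2 * k + 1 + 1 + 1 = 2 * (k + 1) + 1 := by omega
    have ih := loopS_eq m (k + 1)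
    have hc : ((k : Int) + 1 + 1) = (((k + 1 : Nat) : Int) + 1) := by push_cast; ring
    show _ :: _ :: integersA_signed m (2 * k + 1 + 1 + 1) = _
    rw [e1, e2, ih, fodd k, feven k, integersB_pairs, hc]

-- ===== VERDICT (by name: the statement is the Claim_ definition above) =====
theorem integers_spec : Claim_equal_integers := by
  intro signed length _ hpre
  unfold Spec_integers integers integers_alt
  have h1 : 1 ≤ length := hpre
  obtain ⟨m, hm⟩ : ∃ m, length.toNat = m + 1 := ⟨length.toNat - 1, by omega⟩
  cases signed with
  | false =>
    simpa using loopU_eq length.toNat 0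
  | true =>
    rw [hm]
    simp only [if_pos]
    have h0 := loopS_eq m 0
    simp only [Nat.mul_zero, Nat.zero_add, Nat.cast_zero, Int.zero_add] at h0
    simp [integersA_signed, h0]
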